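-- pv_equiv track=rewrite | github.com/Dend0x/MUNI_FI | ib111/11/11/p2_rewrite.py | is_creatable
-- ===== SOURCE A (Python) =====
-- def is_creatable_rec(wanted: list[str], initial: list[str], rules: dict[str, list[str]], seen: set[tuple[str, ...]]) -> bool:
--     current = tuple(initial)
--     if current in seen:
--         return False
--     seen.add(current)
--
--     if initial == wanted:
--         return True
--
--     for index, ch in enumerate(initial):
--         if ch in rules:
--             for rule in rules[ch]:
--                 initial[index] = rule
--                 if is_creatable_rec(wanted, initial, rules, seen):
--                     return True
--                 initial[index] = ch
--
--     return False
--
-- def is_creatable(wanted: str, initial: str,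
--                  rules: dict[str, list[str]]) -> bool:
--     wanted_word: list[str] = []
--     initial_word: list[str] = []
--
--     for ch in wanted:
--         wanted_word.append(ch)
--
--     for ch in initial:
--         initial_word.append(ch)
--
--     return is_creatable_rec(wanted_word, initial_word, rules, set())
-- ===== SOURCE B (Python) =====
-- def is_creatable(wanted: str, initial: str,
--                  rules: dict[str, list[str]]) -> bool:
--     # Per-position reachability: the word rewrites one position at a time and
--     # positions never interact, so wanted is reachable iff lengths match and each
--     # wanted character is reachable from the corresponding initial character in
--     # the token-rewrite graph.  Reachable sets are computed by fixed-point
--     # saturation (at most sum(len(v)) new tokens can ever appear).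
--     if len(wanted) != len(initial):
--         return False
--     bound = sum(len(v) for v in rules.values())
--
--     def closure(c: str) -> set:
--         reach = {c}
--         for _ in range(bound):
--             nxt = set(reach)
--             for t in reach:
--                 nxt.update(rules.get(t, []))
--             reach = nxt
--         return reach
--
--     cache = {c: closure(c) for c in set(initial)}
--     for w_ch, i_ch in zip(wanted, initial):
--         if w_ch not in cache[i_ch]:
--             return False
--     return True
-- ===== Notes on version B (the rewrite author's own statement) =====
-- stated objective: faster
-- what changed: A runs an exponential DFS over whole-word states with a visited set; B exploits that rewrites touch one position at a time and positions never interact, so it checks the lengths and, for each position, computes the set of tokens reachable from the initial character by fixed-point saturation of the rewrite graph and tests membership of the wanted character.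
import Mathlib
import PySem

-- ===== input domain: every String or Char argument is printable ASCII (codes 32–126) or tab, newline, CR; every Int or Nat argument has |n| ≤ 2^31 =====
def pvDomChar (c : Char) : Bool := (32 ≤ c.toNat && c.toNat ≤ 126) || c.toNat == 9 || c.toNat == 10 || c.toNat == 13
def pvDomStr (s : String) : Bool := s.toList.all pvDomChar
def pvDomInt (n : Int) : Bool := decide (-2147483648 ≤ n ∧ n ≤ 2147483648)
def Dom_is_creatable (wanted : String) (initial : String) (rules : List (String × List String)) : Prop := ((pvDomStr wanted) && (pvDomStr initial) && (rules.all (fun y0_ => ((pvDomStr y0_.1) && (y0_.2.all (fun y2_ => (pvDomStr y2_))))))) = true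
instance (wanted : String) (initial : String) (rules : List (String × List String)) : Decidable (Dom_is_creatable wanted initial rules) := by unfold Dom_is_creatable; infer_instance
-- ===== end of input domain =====

-- B replaces A's exponential whole-word DFS by per-position reachability (fixed-point
-- saturation of the token-rewrite graph), which is asymptotically faster; return values
-- are proved equal on the whole domain (A mutates only its own local lists).


-- ===== PORT A =====
-- A's recursion terminates because `seen` only grows inside a finite word space; the
-- `fuel` argument (one token-count^length bound + 1, computed in `is_creatable`) is only
-- a totality guard and is proved never to run out on the fuel given.
mutual
def pvDfs (fuel : Nat) (w i : List String) (r : PySem.Dict String (List String))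
    (seen : PySem.Set (List String)) : Bool × PySem.Set (List String) :=
  match fuel with
  | 0 => (false, seen)                       -- dead branch (fuel never runs out)
  | Nat.succ fuel =>
    if PySem.Set.contains seen i then (false, seen)   -- if current in seen: return False
    else
      let seen1 := PySem.Set.add seen i               -- seen.add(current)
      if i = w then (true, seen1)                     -- if initial == wanted: return True
      else pvLoopPos fuel w i r seen1 0               -- for index, ch in enumerate(initial)
termination_by (fuel, 0, 0)
decreasing_by all_goals (apply Prod.Lex.left; omega)
def pvLoopPos (fuel : Nat) (w i : List String) (r : PySem.Dict String (List String))
    (seen : PySem.Set (List String)) (idx : Nat) : Bool × PySem.Set (List String) :=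
  if h : idx < i.length then
    match r.get? i[idx] with                          -- if ch in rules
    | none => pvLoopPos fuel w i r seen (idx + 1)
    | some rs =>
      match pvLoopRules fuel w i r seen idx rs with   -- for rule in rules[ch]
      | (true, s) => (true, s)
      | (false, s) => pvLoopPos fuel w i r s (idx + 1)
  else (false, seen)
termination_by (fuel, 2 * (i.length - idx) + 2, 0)
decreasing_by all_goals (apply Prod.Lex.right; apply Prod.Lex.left; omega)
def pvLoopRules (fuel : Nat) (w i : List String) (r : PySem.Dict String (List String))
    (seen : PySem.Set (List String)) (idx : Nat) (rs : List String) :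
    Bool × PySem.Set (List String) :=
  match rs with
  | [] => (false, seen)
  | rule :: rest =>
    match pvDfs fuel w (i.set idx rule) r seen with   -- initial[index] = rule; recurse; restore
    | (true, s) => (true, s)
    | (false, s) => pvLoopRules fuel w i r s idx rest
termination_by (fuel, 2 * (i.length - idx) + 1, rs.length + 1)
decreasing_by · apply Prod.Lex.right; apply Prod.Lex.left; omega
              · apply Prod.Lex.right; apply Prod.Lex.right; simp only [List.length_cons]; omega
end

def is_creatable (wanted : String) (initial : String) (rules : List (String × List String)) : Bool :=
  let wl := wanted.toList.map (fun c => String.ofList [c])   -- wanted_word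
  let il := initial.toList.map (fun c => String.ofList [c])  -- initial_word
  let r := PySem.Dict.mk rules
  -- fuel: (number of distinct tokens)^(word length) + 1 bounds the number of word states
  let toks : List String := il ++ rules.foldr (fun p acc => p.2 ++ acc) []
  let fuel := (PySem.Set.ofList toks).length ^ il.length + 1
  (pvDfs fuel wl il r PySem.Set.empty).1

-- ===== PORT B =====
-- nxt = set(reach); for t in reach: nxt.update(rules.get(t, []))
def pvSatStep (r : PySem.Dict String (List String)) (reach : PySem.Set String) :
    PySem.Set String :=
  reach.foldl (fun nxt t => PySem.Set.update nxt (r.getD t [])) (PySem.Set.ofList reach)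

-- reach = {c}; for _ in range(bound): reach = one saturation step
def pvClosure (r : PySem.Dict String (List String)) (bound : Nat) (c : String) :
    PySem.Set String :=
  (List.range bound).foldl (fun reach _ => pvSatStep r reach) (PySem.Set.ofList [c])

def is_creatable_alt (wanted : String) (initial : String) (rules : List (String × List String)) : Bool :=
  let wl := wanted.toList.map (fun c => String.ofList [c])
  let il := initial.toList.map (fun c => String.ofList [c])
  if wl.length ≠ il.length then false
  else
    let r := PySem.Dict.mk rules
    let bound := (r.values.map List.length).sum          -- sum(len(v) for v in rules.values())
    -- cache = {c: closure(c) for c in set(initial)}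
    let cache := (PySem.Set.ofList il).foldl
      (fun d c => d.insert c (pvClosure r bound c)) PySem.Dict.empty
    (wl.zip il).all (fun p => PySem.Set.contains (cache.getD p.2 []) p.1)

-- ===== PRECONDITION & SPEC =====
def Spec_is_creatable (wanted : String) (initial : String) (rules : List (String × List String)) (out : Bool) : Prop := out = is_creatable_alt wanted initial rules
instance (wanted : String) (initial : String) (rules : List (String × List String)) (out : Bool) : Decidable (Spec_is_creatable wanted initial rules out) := by unfold Spec_is_creatable; infer_instance

-- ===== CLAIM (what is proved, stated in full; the proofs are below) =====
def Claim_equal_is_creatable : Prop := ∀ (wanted : String) (initial : String) (rules : List (String × List String)), Dom_is_creatable wanted initial rules → Spec_is_creatable wanted initial rules (is_creatable wanted initial rules)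

-- ===== LEMMAS AND PROOFS =====

-- one token-rewrite step, and one word step (rewrite one position)
def pvTstep (r : PySem.Dict String (List String)) (a b : String) : Prop :=
  b ∈ r.getD a []

def pvWstep (r : PySem.Dict String (List String)) (x y : List String) : Prop :=
  ∃ (idx : Nat) (rule : String), ∃ h : idx < x.length,
    pvTstep r x[idx] rule ∧ y = x.set idx rule

-- words over a token alphabet: the finite universe A's search lives in
def pvInU (ts : List String) (n : Nat) (x : List String) : Prop :=
  x.length = n ∧ ∀ t ∈ x, t ∈ ts

def pvGood (ts : List String) (n : Nat) (seen : List (List String)) : Prop :=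
  seen.Nodup ∧ ∀ x ∈ seen, pvInU ts n x

def pvWordsF (ts : List String) : Nat → Finset (List String)
  | 0 => {[]}
  | n + 1 => ts.toFinset.biUnion (fun t => (pvWordsF ts n).image (t :: ·))

lemma mem_pvWordsF (ts : List String) (n : Nat) (x : List String) :
    x ∈ pvWordsF ts n ↔ pvInU ts n x := by
  induction n generalizing x with
  | zero =>
    cases x <;> simp [pvWordsF, pvInU]
  | succ n ih =>
    cases x with
    | nil => simp [pvWordsF, pvInU]
    | cons a xs =>
      simp only [pvWordsF, Finset.mem_biUnion, Finset.mem_image, List.mem_toFinset]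
      constructor
      · rintro ⟨t, ht, y, hy, heq⟩
        obtain ⟨hl, hm⟩ := (ih y).mp hy
        cases heq
        refine ⟨by simp [hl], ?_⟩
        intro u hu
        rcases List.mem_cons.mp hu with h | h
        · exact h ▸ ht
        · exact hm u h
      · rintro ⟨hl, hm⟩
        exact ⟨a, hm a (by simp), xs, (ih xs).mpr ⟨by simpa using hl,
          fun u hu => hm u (List.mem_cons_of_mem _ hu)⟩, rfl⟩

lemma card_pvWordsF (ts : List String) (n : Nat) :
    (pvWordsF ts n).card ≤ ts.toFinset.card ^ n := by
  induction n with
  | zero => simp [pvWordsF]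
  | succ n ih =>
    calc (pvWordsF ts (n + 1)).card
        ≤ ∑ t ∈ ts.toFinset, ((pvWordsF ts n).image (t :: ·)).card :=
          Finset.card_biUnion_le
      _ ≤ ∑ _t ∈ ts.toFinset, ts.toFinset.card ^ n := by
          refine Finset.sum_le_sum fun t _ => ?_
          exact le_trans Finset.card_image_le ih
      _ = ts.toFinset.card * ts.toFinset.card ^ n := by
          rw [Finset.sum_const, smul_eq_mul]
      _ = ts.toFinset.card ^ (n + 1) := by ring

lemma pv_len_le_card {α : Type} [DecidableEq α] (l : List α) (S : Finset α)
    (hnd : l.Nodup) (h : ∀ x ∈ l, x ∈ S) : l.length ≤ S.card := by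
  calc l.length = l.toFinset.card := (List.toFinset_card_of_nodup hnd).symm
    _ ≤ S.card := Finset.card_le_card (fun x hx => h x (List.mem_toFinset.mp hx))

lemma pv_len_le_of_subset {α : Type} [DecidableEq α] (l l' : List α)
    (hnd : l.Nodup) (h : ∀ x ∈ l, x ∈ l') : l.length ≤ l'.length := by
  calc l.length = l.toFinset.card := (List.toFinset_card_of_nodup hnd).symm
    _ ≤ l'.toFinset.card := Finset.card_le_card (fun x hx =>
        List.mem_toFinset.mpr (h x (List.mem_toFinset.mp hx)))
    _ ≤ l'.length := List.toFinset_card_le l'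

lemma pvInU_set (ts : List String) (n : Nat) {i : List String} {idx : Nat} {rule : String}
    (hi : pvInU ts n i) (hrule : rule ∈ ts) : pvInU ts n (i.set idx rule) := by
  obtain ⟨hl, hm⟩ := hi
  refine ⟨by simpa using hl, ?_⟩
  intro t ht
  rcases List.mem_or_eq_of_mem_set ht with h | h
  · exact hm t h
  · exact h ▸ hrule

-- ----- soundness: a `true` answer exhibits reachability -----
lemma pvSoundRules (r : PySem.Dict String (List String)) (fuel : Nat)
    (hdfs : ∀ w i seen s₂, pvDfs fuel w i r seen = (true, s₂) →
      Relation.ReflTransGen (pvWstep r) i w) :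
    ∀ (rs : List String) (w i : List String) seen s₂ (idx : Nat) (hidx : idx < i.length),
      (∀ rule ∈ rs, pvTstep r i[idx] rule) →
      pvLoopRules fuel w i r seen idx rs = (true, s₂) →
      Relation.ReflTransGen (pvWstep r) i w := by
  intro rs
  induction rs with
  | nil => intro w i seen s₂ idx hidx _ h; rw [pvLoopRules] at h; simp at h
  | cons rule rest ih =>
    intro w i seen s₂ idx hidx hrs h
    rw [pvLoopRules] at h
    rcases hd : pvDfs fuel w (i.set idx rule) r seen with ⟨b, s₁⟩
    rw [hd] at h
    cases b with
    | true =>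
      exact Relation.ReflTransGen.head
        ⟨idx, rule, hidx, hrs rule (List.mem_cons_self), rfl⟩ (hdfs _ _ _ _ hd)
    | false =>
      exact ih w i s₁ s₂ idx hidx (fun ru hru => hrs ru (List.mem_cons_of_mem _ hru)) h

lemma pvSoundPos (r : PySem.Dict String (List String)) (fuel : Nat)
    (hdfs : ∀ w i seen s₂, pvDfs fuel w i r seen = (true, s₂) →
      Relation.ReflTransGen (pvWstep r) i w) :
    ∀ (K idx : Nat) (w i : List String) seen s₂, i.length - idx ≤ K →
      pvLoopPos fuel w i r seen idx = (true, s₂) →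
      Relation.ReflTransGen (pvWstep r) i w := by
  intro K
  induction K with
  | zero =>
    intro idx w i seen s₂ hK h
    rw [pvLoopPos, dif_neg (by omega)] at h
    simp at h
  | succ K ih =>
    intro idx w i seen s₂ hK h
    by_cases hidx : idx < i.length
    · rw [pvLoopPos, dif_pos hidx] at h
      rcases hg : r.get? i[idx] with _ | rs
      · rw [hg] at h
        simp only [] at h
        exact ih (idx + 1) w i seen s₂ (by omega) h
      · rw [hg] at h
        simp only [] at h
        rcases hlr : pvLoopRules fuel w i r seen idx rs with ⟨b, s₁⟩
        rw [hlr] at h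
        cases b with
        | true =>
          refine pvSoundRules r fuel hdfs rs w i seen s₁ idx hidx ?_ hlr
          intro ru hru
          unfold pvTstep
          rw [PySem.Dict.getD_of_get?_eq_some r [] hg]
          exact hru
        | false => exact ih (idx + 1) w i s₁ s₂ (by omega) h
    · rw [pvLoopPos, dif_neg hidx] at h
      simp at h

lemma pvSound (r : PySem.Dict String (List String)) :
    ∀ fuel w i seen s₂, pvDfs fuel w i r seen = (true, s₂) →
      Relation.ReflTransGen (pvWstep r) i w := by
  intro fuel
  induction fuel with
  | zero => intro w i seen s₂ h; rw [pvDfs] at h; simp at h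
  | succ f ih =>
    intro w i seen s₂ h
    rw [pvDfs] at h
    by_cases hc : PySem.Set.contains seen i
    · rw [if_pos hc] at h; simp at h
    · rw [if_neg hc] at h
      by_cases hiw : i = w
      · exact hiw ▸ Relation.ReflTransGen.refl
      · rw [if_neg hiw] at h
        exact pvSoundPos r f ih i.length 0 w i _ s₂ (by omega) h

def pvClosedProp (r : PySem.Dict String (List String)) (w : List String)
    (seen s' : List (List String)) : Prop :=
  ∀ x ∈ s', x ∉ seen → x ≠ w ∧ ∀ y, pvWstep r x y → y ∈ s'

lemma pvClosed_comp (r : PySem.Dict String (List String)) (w : List String)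
    {s0 s1 s2 : List (List String)} (h01 : pvClosedProp r w s0 s1)
    (h12 : pvClosedProp r w s1 s2) (hsub : ∀ x ∈ s1, x ∈ s2) :
    pvClosedProp r w s0 s2 := by
  intro x hx hx0
  by_cases hx1 : x ∈ s1
  · obtain ⟨hne, hsucc⟩ := h01 x hx1 hx0
    exact ⟨hne, fun y hy => hsub y (hsucc y hy)⟩
  · exact h12 x hx hx1

-- ----- completeness: a `false` answer leaves behind a grown, good, closed visited set -----
lemma pvClosedRules (ts : List String) (n : Nat) (r : PySem.Dict String (List String))
    (hr : ∀ a b, pvTstep r a b → b ∈ ts) (fuel : Nat)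
    (hdfs : ∀ w i seen s₂, pvInU ts n i → pvGood ts n seen →
      (pvWordsF ts n).card < fuel + seen.length →
      pvDfs fuel w i r seen = (false, s₂) →
      (∀ x ∈ seen, x ∈ s₂) ∧ pvGood ts n s₂ ∧ i ∈ s₂ ∧ pvClosedProp r w seen s₂) :
    ∀ (rs : List String) (w i : List String) seen s₂ (idx : Nat) (hidx : idx < i.length),
      (∀ rule ∈ rs, pvTstep r i[idx] rule) →
      pvInU ts n i → pvGood ts n seen →
      (pvWordsF ts n).card < fuel + seen.length →
      pvLoopRules fuel w i r seen idx rs = (false, s₂) →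
      (∀ x ∈ seen, x ∈ s₂) ∧ pvGood ts n s₂ ∧ pvClosedProp r w seen s₂ ∧
        (∀ rule ∈ rs, i.set idx rule ∈ s₂) := by
  intro rs
  induction rs with
  | nil =>
    intro w i seen s₂ idx hidx _ _ hgood _ hres
    rw [pvLoopRules] at hres
    cases hres
    exact ⟨fun x hx => hx, hgood, fun x hx hnx => absurd hx hnx, by simp⟩
  | cons rule rest ih =>
    intro w i seen s₂ idx hidx hrs hi hgood hN hres
    rw [pvLoopRules] at hres
    rcases hd : pvDfs fuel w (i.set idx rule) r seen with ⟨b, s₁⟩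
    rw [hd] at hres
    cases b with
    | true => simp at hres
    | false =>
      have hrule : pvTstep r i[idx] rule := hrs rule (List.mem_cons_self)
      obtain ⟨hsub1, hgood1, hmem1, hclosed1⟩ :=
        hdfs w (i.set idx rule) seen s₁ (pvInU_set ts n hi (hr _ _ hrule)) hgood hN hd
      have hN1 : (pvWordsF ts n).card < fuel + s₁.length := by
        have := pv_len_le_of_subset seen s₁ hgood.1 hsub1
        omega
      obtain ⟨hsub2, hgood2, hclosed2, hcov2⟩ := ih w i s₁ s₂ idx hidx
        (fun ru hru => hrs ru (List.mem_cons_of_mem _ hru)) hi hgood1 hN1 hres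
      refine ⟨fun x hx => hsub2 x (hsub1 x hx), hgood2,
        pvClosed_comp r w hclosed1 hclosed2 hsub2, ?_⟩
      intro ru hru
      rcases List.mem_cons.mp hru with h | h
      · exact h ▸ hsub2 _ hmem1
      · exact hcov2 ru h

lemma pvClosedPos (ts : List String) (n : Nat) (r : PySem.Dict String (List String))
    (hr : ∀ a b, pvTstep r a b → b ∈ ts) (fuel : Nat)
    (hdfs : ∀ w i seen s₂, pvInU ts n i → pvGood ts n seen →
      (pvWordsF ts n).card < fuel + seen.length →
      pvDfs fuel w i r seen = (false, s₂) →
      (∀ x ∈ seen, x ∈ s₂) ∧ pvGood ts n s₂ ∧ i ∈ s₂ ∧ pvClosedProp r w seen s₂) :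
    ∀ (K idx : Nat) (w i : List String) seen s₂, i.length - idx ≤ K →
      pvInU ts n i → pvGood ts n seen →
      (pvWordsF ts n).card < fuel + seen.length →
      pvLoopPos fuel w i r seen idx = (false, s₂) →
      (∀ x ∈ seen, x ∈ s₂) ∧ pvGood ts n s₂ ∧ pvClosedProp r w seen s₂ ∧
        (∀ (idx' : Nat) (h : idx' < i.length), idx ≤ idx' →
          ∀ rule, pvTstep r i[idx'] rule → i.set idx' rule ∈ s₂) := by
  intro K
  induction K with
  | zero =>
    intro idx w i seen s₂ hK hi hgood hN hres
    rw [pvLoopPos, dif_neg (by omega)] at hres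
    cases hres
    exact ⟨fun x hx => hx, hgood, fun x hx hnx => absurd hx hnx,
      fun idx' h hle rule _ => absurd h (by omega)⟩
  | succ K ih =>
    intro idx w i seen s₂ hK hi hgood hN hres
    by_cases hidx : idx < i.length
    · rw [pvLoopPos, dif_pos hidx] at hres
      rcases hg : r.get? i[idx] with _ | rs
      · rw [hg] at hres
        simp only [] at hres
        obtain ⟨hsub, hgood', hclosed, hcov⟩ :=
          ih (idx + 1) w i seen s₂ (by omega) hi hgood hN hres
        refine ⟨hsub, hgood', hclosed, ?_⟩
        intro idx' h hle rule hts
        by_cases he : idx' = idx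
        · subst he
          exact absurd hts (by unfold pvTstep; rw [PySem.Dict.getD_of_get?_eq_none r [] hg]; simp)
        · exact hcov idx' h (by omega) rule hts
      · rw [hg] at hres
        simp only [] at hres
        rcases hlr : pvLoopRules fuel w i r seen idx rs with ⟨b, s₁⟩
        rw [hlr] at hres
        cases b with
        | true => simp at hres
        | false =>
          have hrs : ∀ ru ∈ rs, pvTstep r i[idx] ru := by
            intro ru hru
            unfold pvTstep
            rw [PySem.Dict.getD_of_get?_eq_some r [] hg]
            exact hru
          obtain ⟨hsub1, hgood1, hclosed1, hcov1⟩ :=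
            pvClosedRules ts n r hr fuel hdfs rs w i seen s₁ idx hidx hrs hi hgood hN hlr
          have hN1 : (pvWordsF ts n).card < fuel + s₁.length := by
            have := pv_len_le_of_subset seen s₁ hgood.1 hsub1
            omega
          obtain ⟨hsub2, hgood2, hclosed2, hcov2⟩ :=
            ih (idx + 1) w i s₁ s₂ (by omega) hi hgood1 hN1 hres
          refine ⟨fun x hx => hsub2 x (hsub1 x hx), hgood2,
            pvClosed_comp r w hclosed1 hclosed2 hsub2, ?_⟩
          intro idx' h hle rule hts
          by_cases he : idx' = idx
          · subst he
            have hin : rule ∈ rs := by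
              have h3 := hts
              unfold pvTstep at h3
              rwa [PySem.Dict.getD_of_get?_eq_some r [] hg] at h3
            exact hsub2 _ (hcov1 rule hin)
          · exact hcov2 idx' h (by omega) rule hts
    · rw [pvLoopPos, dif_neg hidx] at hres
      cases hres
      exact ⟨fun x hx => hx, hgood, fun x hx hnx => absurd hx hnx,
        fun idx' h hle rule _ => absurd h (by omega)⟩

lemma pvClosed (ts : List String) (n : Nat) (r : PySem.Dict String (List String))
    (hr : ∀ a b, pvTstep r a b → b ∈ ts) :
    ∀ fuel w i seen s₂, pvInU ts n i → pvGood ts n seen →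
      (pvWordsF ts n).card < fuel + seen.length →
      pvDfs fuel w i r seen = (false, s₂) →
      (∀ x ∈ seen, x ∈ s₂) ∧ pvGood ts n s₂ ∧ i ∈ s₂ ∧ pvClosedProp r w seen s₂ := by
  intro fuel
  induction fuel with
  | zero =>
    intro w i seen s₂ hi hgood hN _
    exfalso
    have : seen.length ≤ (pvWordsF ts n).card :=
      pv_len_le_card seen (pvWordsF ts n) hgood.1
        (fun x hx => (mem_pvWordsF ts n x).mpr (hgood.2 x hx))
    omega
  | succ f ih =>
    intro w i seen s₂ hi hgood hN hres
    rw [pvDfs] at hres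
    by_cases hc : PySem.Set.contains seen i
    · rw [if_pos hc] at hres
      cases hres
      exact ⟨fun x hx => hx, hgood, (PySem.Set.contains_iff _ _).mp hc,
        fun x hx hnx => absurd hx hnx⟩
    · rw [if_neg hc] at hres
      have hinotin : i ∉ seen := fun h => hc ((PySem.Set.contains_iff _ _).mpr h)
      have hgood1 : pvGood ts n (PySem.Set.add seen i) := by
        refine ⟨PySem.Set.nodup_add seen i hgood.1, ?_⟩
        intro x hx
        rcases (PySem.Set.mem_add _ _ _).mp hx with h | h
        · exact hgood.2 x h
        · exact h ▸ hi
      have hlen1 : (PySem.Set.add seen i).length = seen.length + 1 := by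
        rw [PySem.Set.add_of_not_mem hinotin]
        simp
      by_cases hiw : i = w
      · rw [if_pos hiw] at hres; simp at hres
      · rw [if_neg hiw] at hres
        have hN1 : (pvWordsF ts n).card < f + (PySem.Set.add seen i).length := by omega
        obtain ⟨hsub, hgood', hclosed, hcov⟩ :=
          pvClosedPos ts n r hr f ih i.length 0 w i (PySem.Set.add seen i) s₂
            (by omega) hi hgood1 hN1 hres
        have hiin : i ∈ s₂ := hsub i ((PySem.Set.mem_add _ _ _).mpr (Or.inr rfl))
        refine ⟨fun x hx => hsub x ((PySem.Set.mem_add _ _ _).mpr (Or.inl hx)), hgood', hiin, ?_⟩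
        intro x hx hnx
        by_cases hxi : x = i
        · subst hxi
          refine ⟨hiw, ?_⟩
          rintro y ⟨idx, rule, hidxlt, hts, rfl⟩
          exact hcov idx hidxlt (by omega) rule hts
        · refine hclosed x hx ?_
          intro hmem
          rcases (PySem.Set.mem_add _ _ _).mp hmem with h | h
          · exact hnx h
          · exact hxi h

-- ----- A's result characterised by word-level reachability -----
lemma pv_mem_foldr_append (b : String) :
    ∀ (l : List (String × List String)) (p : String × List String), p ∈ l → b ∈ p.2 →
      b ∈ l.foldr (fun p acc => p.2 ++ acc) [] := by
  intro l
  induction l with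
  | nil => simp
  | cons q qs ih =>
    intro p hp hb
    simp only [List.foldr_cons, List.mem_append]
    rcases List.mem_cons.mp hp with h | h
    · exact Or.inl (h ▸ hb)
    · exact Or.inr (ih p h hb)

lemma pv_ofList_length {α : Type} [BEq α] [LawfulBEq α] [DecidableEq α] (l : List α) :
    (PySem.Set.ofList l).length = l.toFinset.card := by
  have h1 : (PySem.Set.ofList l).toFinset = l.toFinset := by
    ext x
    simp [List.mem_toFinset, PySem.Set.mem_ofList]
  rw [← List.toFinset_card_of_nodup (PySem.Set.nodup_ofList l), h1]

lemma pvDfsTop (wl il : List String) (r : PySem.Dict String (List String))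
    (toks : List String) (hil : ∀ t ∈ il, t ∈ toks)
    (hr : ∀ a b, pvTstep r a b → b ∈ toks)
    (hfuel : (pvWordsF toks il.length).card < (PySem.Set.ofList toks).length ^ il.length + 1) :
    ((pvDfs ((PySem.Set.ofList toks).length ^ il.length + 1) wl il r PySem.Set.empty).1 = true ↔
      Relation.ReflTransGen (pvWstep r) il wl) := by
  rcases hres : pvDfs ((PySem.Set.ofList toks).length ^ il.length + 1) wl il r
    PySem.Set.empty with ⟨b, s⟩
  constructor
  · intro h
    cases b with
    | false => simp at h
    | true => exact pvSound r _ wl il _ s hres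
  · intro hrtg
    cases b with
    | true => rfl
    | false =>
      exfalso
      obtain ⟨_, _, hmem, hclosed⟩ :=
        pvClosed toks il.length r hr _ wl il PySem.Set.empty s ⟨rfl, hil⟩
          ⟨List.nodup_nil, by simp [PySem.Set.empty]⟩
          (by simpa [PySem.Set.empty] using hfuel) hres
      have hall : ∀ x, Relation.ReflTransGen (pvWstep r) il x → x ∈ s := by
        intro x hx
        induction hx with
        | refl => exact hmem
        | tail hab hbc ihx => exact (hclosed _ ihx (by simp [PySem.Set.empty])).2 _ hbc
      exact (hclosed wl (hall wl hrtg) (by simp [PySem.Set.empty])).1 rfl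

lemma is_creatable_iff (wanted initial : String) (rules : List (String × List String)) :
    is_creatable wanted initial rules = true ↔
      Relation.ReflTransGen (pvWstep (PySem.Dict.mk rules))
        (initial.toList.map (fun c => String.ofList [c]))
        (wanted.toList.map (fun c => String.ofList [c])) := by
  simp only [is_creatable]
  refine pvDfsTop _ _ _ _ (fun t ht => List.mem_append_left _ ht) ?_ ?_
  · intro a b h
    unfold pvTstep at h
    rcases hg : (PySem.Dict.mk rules).get? a with _ | rs
    · rw [PySem.Dict.getD_of_get?_eq_none _ [] hg] at h
      simp at h
    · rw [PySem.Dict.getD_of_get?_eq_some _ [] hg] at h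
      have hit : (a, rs) ∈ rules := PySem.Dict.mem_items_of_get?_eq_some _ hg
      exact List.mem_append_right _ (pv_mem_foldr_append b rules (a, rs) hit h)
  · have h1 := card_pvWordsF
      ((initial.toList.map (fun c => String.ofList [c])) ++
        rules.foldr (fun p acc => p.2 ++ acc) [])
      ((initial.toList.map (fun c => String.ofList [c])).length)
    rw [← pv_ofList_length] at h1
    omega

-- ----- product decomposition: word reachability = per-position token reachability -----
lemma pv_rtg_pointwise (r : PySem.Dict String (List String)) {x y : List String}
    (h : Relation.ReflTransGen (pvWstep r) x y) :
    y.length = x.length ∧ ∀ (k : Nat) (hx : k < x.length) (hy : k < y.length),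
      Relation.ReflTransGen (pvTstep r) x[k] y[k] := by
  induction h with
  | refl => exact ⟨rfl, fun k hx hy => Relation.ReflTransGen.refl⟩
  | tail hab hbc ih =>
    obtain ⟨hl, hp⟩ := ih
    obtain ⟨idx, rule, hidx, hts, rfl⟩ := hbc
    refine ⟨by simpa using hl, ?_⟩
    intro k hx hy
    by_cases hk : k = idx
    · subst hk
      have h1 := hp k hx hidx
      refine Relation.ReflTransGen.tail h1 ?_
      simpa [List.getElem_set, hidx] using hts
    · have h2 := hp k hx (by simpa using hy)
      simpa [List.getElem_set, hk, Ne.symm hk] using h2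

lemma pv_lift_head (r : PySem.Dict String (List String)) {a b : String} (xs : List String)
    (h : Relation.ReflTransGen (pvTstep r) a b) :
    Relation.ReflTransGen (pvWstep r) (a :: xs) (b :: xs) := by
  induction h with
  | refl => exact Relation.ReflTransGen.refl
  | tail hab hbc ih =>
    refine Relation.ReflTransGen.tail ih ⟨0, _, by simp, by simpa using hbc, by simp⟩

lemma pv_lift_tail (r : PySem.Dict String (List String)) (a : String) {xs ys : List String}
    (h : Relation.ReflTransGen (pvWstep r) xs ys) :
    Relation.ReflTransGen (pvWstep r) (a :: xs) (a :: ys) := by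
  induction h with
  | refl => exact Relation.ReflTransGen.refl
  | tail hab hbc ih =>
    obtain ⟨idx, rule, hidx, hts, rfl⟩ := hbc
    exact Relation.ReflTransGen.tail ih
      ⟨idx + 1, rule, by simpa using Nat.succ_lt_succ hidx, by simpa using hts, by simp⟩

lemma pv_rtg_of_pointwise (r : PySem.Dict String (List String)) :
    ∀ (x y : List String), x.length = y.length →
      (∀ (k : Nat) (hx : k < x.length) (hy : k < y.length),
        Relation.ReflTransGen (pvTstep r) x[k] y[k]) →
      Relation.ReflTransGen (pvWstep r) x y := by
  intro x
  induction x with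
  | nil =>
    intro y hl _
    have h0 : y = [] := List.eq_nil_of_length_eq_zero (by simpa using hl.symm)
    subst h0
    exact Relation.ReflTransGen.refl
  | cons a xs ih =>
    intro y hl hp
    cases y with
    | nil => simp at hl
    | cons b ys =>
      have hhead : Relation.ReflTransGen (pvTstep r) a b := by
        simpa using hp 0 (by simp) (by simp)
      have htail : Relation.ReflTransGen (pvWstep r) xs ys := by
        refine ih ys (by simpa using hl) ?_
        intro k hx hy
        simpa using hp (k + 1) (by simpa using Nat.succ_lt_succ hx)
          (by simpa using Nat.succ_lt_succ hy)
      exact Relation.ReflTransGen.trans (pv_lift_head r xs hhead) (pv_lift_tail r b htail)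

-- ----- B's saturation computes exactly token reachability -----
lemma pv_mem_foldl_update (r : PySem.Dict String (List String)) (y : String) :
    ∀ (l : List String) (acc : PySem.Set String),
      (y ∈ l.foldl (fun nxt t => PySem.Set.update nxt (r.getD t [])) acc ↔
        y ∈ acc ∨ ∃ t ∈ l, y ∈ r.getD t []) := by
  intro l
  induction l with
  | nil => simp
  | cons a l ih =>
    intro acc
    simp only [List.foldl_cons, ih, PySem.Set.mem_update, List.mem_cons]
    constructor
    · rintro (( h | h) | ⟨t, ht, hy⟩)
      · exact Or.inl h
      · exact Or.inr ⟨a, Or.inl rfl, h⟩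
      · exact Or.inr ⟨t, Or.inr ht, hy⟩
    · rintro (h | ⟨t, rfl | ht, hy⟩)
      · exact Or.inl (Or.inl h)
      · exact Or.inl (Or.inr hy)
      · exact Or.inr ⟨t, ht, hy⟩

lemma pv_nodup_foldl_update (r : PySem.Dict String (List String)) :
    ∀ (l : List String) (acc : PySem.Set String), acc.Nodup →
      (l.foldl (fun nxt t => PySem.Set.update nxt (r.getD t [])) acc).Nodup := by
  intro l
  induction l with
  | nil => intro acc h; simpa using h
  | cons a l ih =>
    intro acc h
    exact ih _ (PySem.Set.nodup_update acc _ h)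

lemma pv_mem_satStep (r : PySem.Dict String (List String)) (reach : PySem.Set String)
    (y : String) : y ∈ pvSatStep r reach ↔ y ∈ reach ∨ ∃ t ∈ reach, pvTstep r t y := by
  unfold pvSatStep
  rw [pv_mem_foldl_update]
  simp [PySem.Set.mem_ofList, pvTstep]

lemma pv_nodup_satStep (r : PySem.Dict String (List String)) (reach : PySem.Set String) :
    (pvSatStep r reach).Nodup := by
  exact pv_nodup_foldl_update r reach _ (PySem.Set.nodup_ofList reach)

lemma pvClosure_succ (r : PySem.Dict String (List String)) (k : Nat) (c : String) :
    pvClosure r (k + 1) c = pvSatStep r (pvClosure r k c) := by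
  unfold pvClosure
  rw [List.range_succ, List.foldl_append]
  rfl

lemma pvClosure_zero (r : PySem.Dict String (List String)) (c : String) :
    pvClosure r 0 c = [c] := rfl

lemma pvClosure_nodup (r : PySem.Dict String (List String)) (c : String) :
    ∀ k, (pvClosure r k c).Nodup := by
  intro k
  induction k with
  | zero => rw [pvClosure_zero]; simp
  | succ k ih => rw [pvClosure_succ]; exact pv_nodup_satStep r _

lemma pvClosure_mono (r : PySem.Dict String (List String)) (c y : String) (k : Nat)
    (h : y ∈ pvClosure r k c) : y ∈ pvClosure r (k + 1) c := by
  rw [pvClosure_succ]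
  exact (pv_mem_satStep r _ y).mpr (Or.inl h)

lemma pvClosure_self (r : PySem.Dict String (List String)) (c : String) :
    ∀ k, c ∈ pvClosure r k c := by
  intro k
  induction k with
  | zero => rw [pvClosure_zero]; simp
  | succ k ih => exact pvClosure_mono r c c k ih

lemma pvClosure_sound (r : PySem.Dict String (List String)) (c : String) :
    ∀ k y, y ∈ pvClosure r k c → Relation.ReflTransGen (pvTstep r) c y := by
  intro k
  induction k with
  | zero =>
    intro y hy
    rw [pvClosure_zero] at hy
    simp at hy
    exact hy ▸ Relation.ReflTransGen.refl
  | succ k ih =>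
    intro y hy
    rw [pvClosure_succ] at hy
    rcases (pv_mem_satStep r _ y).mp hy with h | ⟨t, ht, hts⟩
    · exact ih y h
    · exact Relation.ReflTransGen.tail (ih t ht) hts

lemma pvSatStep_congr (r : PySem.Dict String (List String)) {s s' : PySem.Set String}
    (h : ∀ z, z ∈ s ↔ z ∈ s') : ∀ y, y ∈ pvSatStep r s ↔ y ∈ pvSatStep r s' := by
  intro y
  rw [pv_mem_satStep, pv_mem_satStep]
  constructor
  · rintro (hy | ⟨t, ht, hts⟩)
    · exact Or.inl ((h y).mp hy)
    · exact Or.inr ⟨t, (h t).mp ht, hts⟩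
  · rintro (hy | ⟨t, ht, hts⟩)
    · exact Or.inl ((h y).mpr hy)
    · exact Or.inr ⟨t, (h t).mpr ht, hts⟩

lemma pvStable_prop (r : PySem.Dict String (List String)) (c : String) (k : Nat)
    (hst : ∀ z, z ∈ pvClosure r (k + 1) c ↔ z ∈ pvClosure r k c) :
    ∀ j z, z ∈ pvClosure r (k + j) c ↔ z ∈ pvClosure r k c := by
  intro j
  induction j with
  | zero => intro z; rfl
  | succ j ih =>
    intro z
    have e : k + (j + 1) = (k + j) + 1 := by omega
    rw [e, pvClosure_succ]
    calc z ∈ pvSatStep r (pvClosure r (k + j) c)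
        ↔ z ∈ pvSatStep r (pvClosure r k c) := pvSatStep_congr r ih z
      _ ↔ z ∈ pvClosure r (k + 1) c := by rw [pvClosure_succ]
      _ ↔ z ∈ pvClosure r k c := hst z

lemma pvClosure_sub (r : PySem.Dict String (List String)) (c : String) :
    ∀ k y, y ∈ pvClosure r k c → y ∈ c :: r.values.flatten := by
  intro k
  induction k with
  | zero =>
    intro y hy
    rw [pvClosure_zero] at hy
    simp at hy
    simp [hy]
  | succ k ih =>
    intro y hy
    rw [pvClosure_succ] at hy
    rcases (pv_mem_satStep r _ y).mp hy with h | ⟨t, _, hts⟩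
    · exact ih y h
    · unfold pvTstep at hts
      rcases hg : r.get? t with _ | rs
      · rw [PySem.Dict.getD_of_get?_eq_none r [] hg] at hts
        simp at hts
      · rw [PySem.Dict.getD_of_get?_eq_some r [] hg] at hts
        have hrs : rs ∈ r.values :=
          List.mem_map.mpr ⟨(t, rs), PySem.Dict.mem_items_of_get?_eq_some r hg, rfl⟩
        exact List.mem_cons_of_mem _ (List.mem_flatten.mpr ⟨rs, hrs, hts⟩)

lemma pvClosure_len_le (r : PySem.Dict String (List String)) (c : String) (k : Nat) :
    (pvClosure r k c).length ≤ (r.values.map List.length).sum + 1 := by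
  have h := pv_len_le_of_subset (pvClosure r k c) (c :: r.values.flatten)
    (pvClosure_nodup r c k) (pvClosure_sub r c k)
  simpa [List.length_flatten] using h

lemma pvClosure_grow (r : PySem.Dict String (List String)) (c : String) (k : Nat)
    (hnot : ¬∀ z, z ∈ pvClosure r (k + 1) c ↔ z ∈ pvClosure r k c) :
    (pvClosure r k c).length + 1 ≤ (pvClosure r (k + 1) c).length := by
  push Not at hnot
  obtain ⟨z, hz⟩ := hnot
  have hmono := pvClosure_mono r c z k
  have hz1 : z ∈ pvClosure r (k + 1) c := by tauto
  have hz2 : z ∉ pvClosure r k c := by tauto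
  have hsub : (pvClosure r k c).toFinset ⊆ (pvClosure r (k + 1) c).toFinset := by
    intro x hx
    exact List.mem_toFinset.mpr (pvClosure_mono r c x k (List.mem_toFinset.mp hx))
  have hss : (pvClosure r k c).toFinset ⊂ (pvClosure r (k + 1) c).toFinset :=
    ⟨hsub, fun hsup => hz2 (List.mem_toFinset.mp (hsup (List.mem_toFinset.mpr hz1)))⟩
  have hcard := Finset.card_lt_card hss
  rw [List.toFinset_card_of_nodup (pvClosure_nodup r c k),
    List.toFinset_card_of_nodup (pvClosure_nodup r c (k + 1))] at hcard
  omega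

lemma pvClosure_fix (r : PySem.Dict String (List String)) (c y : String)
    (hy : y ∈ pvClosure r ((r.values.map List.length).sum + 1) c) :
    y ∈ pvClosure r ((r.values.map List.length).sum) c := by
  have hstable : ∃ k, k ≤ (r.values.map List.length).sum ∧
      ∀ z, z ∈ pvClosure r (k + 1) c ↔ z ∈ pvClosure r k c := by
    by_contra h
    have hlen : ∀ m, m ≤ (r.values.map List.length).sum + 1 →
        m + 1 ≤ (pvClosure r m c).length := by
      intro m
      induction m with
      | zero => intro _; rw [pvClosure_zero]; simp
      | succ m ihm =>
        intro hm
        have h1 := ihm (by omega)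
        have h2 := pvClosure_grow r c m (fun hiff2 => h ⟨m, by omega, hiff2⟩)
        omega
    have h3 := hlen ((r.values.map List.length).sum + 1) le_rfl
    have h4 := pvClosure_len_le r c ((r.values.map List.length).sum + 1)
    omega
  obtain ⟨k, hk, hst⟩ := hstable
  have h1 := pvStable_prop r c k hst ((r.values.map List.length).sum + 1 - k) y
  rw [show k + ((r.values.map List.length).sum + 1 - k) =
    (r.values.map List.length).sum + 1 from by omega] at h1
  have h2 := pvStable_prop r c k hst ((r.values.map List.length).sum - k) y
  rw [show k + ((r.values.map List.length).sum - k) =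
    (r.values.map List.length).sum from by omega] at h2
  exact h2.mpr (h1.mp hy)

lemma pv_mem_closure_iff (r : PySem.Dict String (List String)) (c y : String) :
    y ∈ pvClosure r ((r.values.map List.length).sum) c ↔
      Relation.ReflTransGen (pvTstep r) c y := by
  constructor
  · exact pvClosure_sound r c _ y
  · intro h
    induction h with
    | refl => exact pvClosure_self r c _
    | tail hab hbc ih =>
      apply pvClosure_fix
      rw [pvClosure_succ]
      exact (pv_mem_satStep r _ _).mpr (Or.inr ⟨_, ih, hbc⟩)

-- ----- the cache dictionary just tabulates pvClosure -----
lemma pv_getD_foldl_insert {κ ν : Type} [BEq κ] [LawfulBEq κ] [DecidableEq κ]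
    (f : κ → ν) (dflt : ν) :
    ∀ (l : List κ) (d : PySem.Dict κ ν) (x : κ),
      ((l.foldl (fun d c => d.insert c (f c)) d).getD x dflt) =
        if x ∈ l then f x else d.getD x dflt := by
  intro l
  induction l with
  | nil => simp
  | cons a l ih =>
    intro d x
    simp only [List.foldl_cons, ih, PySem.Dict.getD_insert, List.mem_cons]
    by_cases h1 : x ∈ l <;> by_cases h2 : x = a <;> simp [h1, h2]

lemma pv_zip_all_iff {α β : Type} (f : α × β → Bool) :
    ∀ (xs : List α) (ys : List β), ((xs.zip ys).all f = true) ↔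
      ∀ (k : Nat) (hx : k < xs.length) (hy : k < ys.length), f (xs[k], ys[k]) = true := by
  intro xs
  induction xs with
  | nil => intro ys; simp
  | cons a xs ih =>
    intro ys
    cases ys with
    | nil => simp
    | cons b ys =>
      simp only [List.zip_cons_cons, List.all_cons, Bool.and_eq_true, ih]
      constructor
      · rintro ⟨h0, h⟩ k hx hy
        cases k with
        | zero => simpa using h0
        | succ k => simpa using h k (by simpa using hx) (by simpa using hy)
      · intro h
        refine ⟨by simpa using h 0 (by simp) (by simp), fun k hx hy => ?_⟩
        simpa using h (k + 1) (by simpa using hx) (by simpa using hy)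

lemma is_creatable_alt_iff (wanted initial : String) (rules : List (String × List String)) :
    is_creatable_alt wanted initial rules = true ↔
      ((wanted.toList.map (fun c => String.ofList [c])).length =
        (initial.toList.map (fun c => String.ofList [c])).length ∧
      ∀ (k : Nat) (hx : k < (initial.toList.map (fun c => String.ofList [c])).length)
        (hy : k < (wanted.toList.map (fun c => String.ofList [c])).length),
        Relation.ReflTransGen (pvTstep (PySem.Dict.mk rules))
          (initial.toList.map (fun c => String.ofList [c]))[k]
          (wanted.toList.map (fun c => String.ofList [c]))[k]) := by
  simp only [is_creatable_alt]
  by_cases hl : (wanted.toList.map (fun c => String.ofList [c])).length =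
      (initial.toList.map (fun c => String.ofList [c])).length
  · rw [if_neg (not_not_intro hl), pv_zip_all_iff]
    have key : ∀ (k : Nat)
        (h1 : k < (wanted.toList.map (fun c => String.ofList [c])).length)
        (h2 : k < (initial.toList.map (fun c => String.ofList [c])).length),
        (PySem.Set.contains
          ((((PySem.Set.ofList (initial.toList.map (fun c => String.ofList [c]))).foldl
            (fun d c => d.insert c
              (pvClosure (PySem.Dict.mk rules)
                (((PySem.Dict.mk rules).values.map List.length).sum) c))
            PySem.Dict.empty)).getD
            (initial.toList.map (fun c => String.ofList [c]))[k] [])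
          (wanted.toList.map (fun c => String.ofList [c]))[k] = true) ↔
        Relation.ReflTransGen (pvTstep (PySem.Dict.mk rules))
          (initial.toList.map (fun c => String.ofList [c]))[k]
          (wanted.toList.map (fun c => String.ofList [c]))[k] := by
      intro k h1 h2
      rw [pv_getD_foldl_insert, if_pos ((PySem.Set.mem_ofList _ _).mpr (List.getElem_mem h2)),
        PySem.Set.contains_iff, pv_mem_closure_iff]
    constructor
    · intro h
      refine ⟨hl, ?_⟩
      intro k hx hy
      exact (key k hy hx).mp (h k hy hx)
    · rintro ⟨_, hp⟩
      intro k hx hy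
      exact (key k hx hy).mpr (hp k hy hx)
  · rw [if_pos hl]
    simp only [Bool.false_eq_true, false_iff]
    exact fun hc => hl hc.1

-- ===== VERDICT (by name: the statement is the Claim_ definition above) =====
theorem is_creatable_spec : Claim_equal_is_creatable := by
  unfold Claim_equal_is_creatable
  intro wanted initial rules _
  unfold Spec_is_creatable
  have hA := is_creatable_iff wanted initial rules
  have hB := is_creatable_alt_iff wanted initial rules
  have hiff : is_creatable wanted initial rules = true ↔
      is_creatable_alt wanted initial rules = true := by
    rw [hA, hB]
    constructor
    · intro h
      obtain ⟨hl, hp⟩ := pv_rtg_pointwise _ h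
      exact ⟨hl, fun k hx hy => hp k hx hy⟩
    · rintro ⟨hl, hp⟩
      exact pv_rtg_of_pointwise _ _ _ hl.symm (fun k hx hy => hp k hx hy)
  rcases hb : is_creatable_alt wanted initial rules with _ | _
  · rcases ha : is_creatable wanted initial rules with _ | _
    · rfl
    · exact absurd (hb ▸ hiff.mp ha) (by simp)
  · exact hiff.mpr hb
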